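-- pv_equiv track=rewrite | github.com/parttee/tira2020 | week5/wordpairs.py | count
-- ===== SOURCE A (Python) =====
-- def count(t):
--     n = len(t)
--
--     sets = {}
--
--     for i in range(n):
--         v = set(t[i])
--         k = ''.join(sorted([c for c in v]))
--         if k not in sets:
--             sets[k] = 0
--         sets[k] += 1
--
--     c = 0
--
--     for k in sets:
--         if sets[k] > 1:
--             c += sets[k] * (sets[k] - 1) // 2
--
--     return c
-- ===== SOURCE B (Python) =====
-- def count(t):
--     c = 0
--     counts = {}
--     for w in t:
--         k = ''.join(sorted(set(w)))
--         prev = counts.get(k, 0)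
--         c += prev
--         counts[k] = prev + 1
--     return c
-- ===== Notes on version B (the rewrite author's own statement) =====
-- stated objective: simpler
-- what changed: Single pass that adds each key's current count to a running total before incrementing it, replacing A's build-a-table-then-sum-m*(m-1)//2-over-groups two-phase scheme.
import Mathlib
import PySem

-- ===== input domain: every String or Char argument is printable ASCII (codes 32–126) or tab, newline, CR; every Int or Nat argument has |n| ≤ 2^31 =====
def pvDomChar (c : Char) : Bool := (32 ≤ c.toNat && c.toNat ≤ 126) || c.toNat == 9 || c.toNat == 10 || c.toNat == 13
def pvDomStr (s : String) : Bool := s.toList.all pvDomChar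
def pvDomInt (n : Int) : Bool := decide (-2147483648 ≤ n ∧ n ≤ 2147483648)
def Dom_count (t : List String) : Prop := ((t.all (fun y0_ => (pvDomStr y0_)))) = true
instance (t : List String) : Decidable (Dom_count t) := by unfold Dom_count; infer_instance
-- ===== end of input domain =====

-- B replaces A's two-phase build-groups-then-sum-m*(m-1)//2 with a single pass that adds each
-- key's current count to a running total before incrementing it (simpler decomposition; same cost).

-- ===== PORT A =====
-- ''.join(sorted([c for c in v])) on a set v of characters is ported as String.ofList of the
-- sorted element list (exact: joining one-character strings concatenates the characters).
def count (t : List String) : Int :=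
  let n : Int := (t.length : Int)
  let sets : PySem.Dict String Int :=
    (PySem.List.pyRange 0 n 1).foldl (fun (sets : PySem.Dict String Int) i =>
      let v := PySem.Set.ofList (PySem.List.pyGetD t i "").toList
      let k := String.ofList (PySem.List.sorted v (fun c => c) false)
      let sets := if sets.contains k then sets else sets.insert k 0
      sets.modify k 0 (· + 1)) PySem.Dict.empty
  sets.keys.foldl (fun c k =>
    if sets.getD k 0 > 1 then c + PySem.Int.floordiv (sets.getD k 0 * (sets.getD k 0 - 1)) 2
    else c) 0

-- ===== PORT B =====
def count_alt (t : List String) : Int :=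
  (t.foldl (fun (st : Int × PySem.Dict String Int) w =>
      let k := String.ofList (PySem.List.sorted (PySem.Set.ofList w.toList) (fun c => c) false)
      let prev := st.2.getD k 0
      (st.1 + prev, st.2.insert k (prev + 1))) (0, PySem.Dict.empty)).1

-- ===== PRECONDITION & SPEC =====
def Spec_count (t : List String) (out : Int) : Prop := out = count_alt t
instance (t : List String) (out : Int) : Decidable (Spec_count t out) := by unfold Spec_count; infer_instance

-- ===== CLAIM (what is proved, stated in full; the proofs are below) =====
def Claim_equal_count : Prop := ∀ (t : List String), Dom_count t → Spec_count t (count t)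

-- ===== LEMMAS AND PROOFS =====

-- the canonical key of a word (sorted distinct characters), shared by both ports
def pvKey (w : String) : String :=
  String.ofList (PySem.List.sorted (PySem.Set.ofList w.toList) (fun c => c) false)

-- pair count contributed by a group of size n, as A computes it
def pvG (n : Int) : Int := if n > 1 then PySem.Int.floordiv (n * (n - 1)) 2 else 0

-- the common reference value: sum of pvG over the multiset of keys
def pvS (ks : List String) : Int :=
  ((PySem.List.dedup ks).map (fun k => pvG ((ks.count k : Int)))).sum

theorem pvG_succ (n : Int) (h : 1 ≤ n) : pvG (n + 1) = pvG n + n := by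
  unfold pvG
  rcases eq_or_lt_of_le h with h1 | h1
  · subst h1; norm_num [PySem.Int.floordiv]
  · rw [if_pos (by omega), if_pos (by omega)]
    have : (n + 1) * (n + 1 - 1) = n * (n - 1) + n * 2 := by ring
    rw [this]
    simp [PySem.Int.floordiv, Int.add_mul_fdiv_right _ _ (by norm_num : (2:Int) ≠ 0)]

theorem pvDedup_concat (ks : List String) (k0 : String) :
    PySem.List.dedup (ks ++ [k0])
      = if k0 ∈ ks then PySem.List.dedup ks else PySem.List.dedup ks ++ [k0] := by
  simp only [PySem.List.dedup_eq_ofList, PySem.Set.ofList_eq_foldl, List.foldl_append,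
    List.foldl_cons, List.foldl_nil]
  rw [PySem.Set.add]
  have : (List.foldl PySem.Set.add [] ks).contains k0 = decide (k0 ∈ ks) := by
    rw [← PySem.Set.ofList_eq_foldl]
    simp [PySem.Set.contains, PySem.Set.mem_ofList]
  rw [this]
  by_cases h : k0 ∈ ks <;> simp [h]

-- appending one key adds exactly (number of earlier equal keys) new pairs
theorem pvS_concat (ks : List String) (k0 : String) :
    pvS (ks ++ [k0]) = pvS ks + (ks.count k0 : Int) := by
  have hc : ∀ k, k ≠ k0 → (ks ++ [k0]).count k = ks.count k := by
    intro k hk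
    simp [List.count_append, Ne.symm hk]
  by_cases h : k0 ∈ ks
  · rw [pvS, pvS, pvDedup_concat, if_pos h]
    obtain ⟨s, t2, hst⟩ := List.append_of_mem ((PySem.List.mem_dedup ks k0).2 h)
    have nd : (PySem.List.dedup ks).Nodup := PySem.List.nodup_dedup ks
    rw [hst] at nd
    have hk0 : k0 ∉ s ++ t2 := by
      have := List.nodup_middle.1 nd
      simp only [List.nodup_cons] at this
      exact this.1
    have hs : k0 ∉ s := fun hx => hk0 (by simp [hx])
    have ht : k0 ∉ t2 := fun hx => hk0 (by simp [hx])
    have hcnt : (ks ++ [k0]).count k0 = ks.count k0 + 1 := by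
      simp [List.count_append]
    have hpos : (1 : Int) ≤ (ks.count k0 : Int) := by
      have := List.count_pos_iff.2 h
      omega
    rw [hst]
    simp only [List.map_append, List.map_cons, List.sum_append, List.sum_cons]
    rw [List.map_congr_left (fun x hx => by rw [hc x (fun he => hs (he ▸ hx))]),
        List.map_congr_left (l := t2) (fun x hx => by rw [hc x (fun he => ht (he ▸ hx))]),
        hcnt]
    push_cast
    rw [pvG_succ _ hpos]
    ring
  · rw [pvS, pvS, pvDedup_concat, if_neg h]
    have hz : ks.count k0 = 0 := List.count_eq_zero.2 h
    have hcnt : (ks ++ [k0]).count k0 = 1 := by simp [List.count_append, hz]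
    simp only [List.map_append, List.map_cons, List.map_nil, List.sum_append, List.sum_cons,
      List.sum_nil, hcnt, hz]
    rw [List.map_congr_left (fun x hx => by
      rw [hc x (fun he => h (he ▸ (PySem.List.mem_dedup ks x).1 hx))])]
    norm_num [pvG]

-- A's dict step (setdefault-to-0 then += 1) is exactly Counter's 'modify key 0 (+1)'
theorem pvStepA_eq (d : PySem.Dict String Int) (k : String) :
    (if d.contains k then d else d.insert k 0).modify k 0 (· + 1)
      = d.modify k 0 (· + 1) := by
  by_cases h : d.contains k
  · simp [h]
  · have hg : d.getD k 0 = 0 := by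
      simp [PySem.Dict.getD, (PySem.Dict.get?_eq_none_iff_contains d k).2 (by simpa using h)]
    simp [h, PySem.Dict.modify, PySem.Dict.insert_insert_self, PySem.Dict.getD_insert_self, hg]

theorem pvFoldl_addif (l : List String) (P : String → Prop) [DecidablePred P]
    (g : String → Int) (c0 : Int) :
    l.foldl (fun c k => if P k then c + g k else c) c0
      = c0 + (l.map (fun k => if P k then g k else 0)).sum := by
  induction l generalizing c0 with
  | nil => simp
  | cons x xs ih =>
    simp only [List.foldl_cons, List.map_cons, List.sum_cons, ih]
    by_cases h : P x <;> simp [h] <;> try ring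

theorem count_eq_pvS (t : List String) : count t = pvS (t.map pvKey) := by
  unfold count
  dsimp only
  rw [PySem.List.foldl_pyRange_zero_pyGetD' t ""
    (fun (sets : PySem.Dict String Int) w =>
      (if sets.contains (String.ofList (PySem.List.sorted (PySem.Set.ofList w.toList) (fun c => c) false))
       then sets
       else sets.insert (String.ofList (PySem.List.sorted (PySem.Set.ofList w.toList) (fun c => c) false)) 0).modify
        (String.ofList (PySem.List.sorted (PySem.Set.ofList w.toList) (fun c => c) false)) 0 (· + 1))
    PySem.Dict.empty]
  have hsets : t.foldl (fun (sets : PySem.Dict String Int) w =>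
      (if sets.contains (String.ofList (PySem.List.sorted (PySem.Set.ofList w.toList) (fun c => c) false))
       then sets
       else sets.insert (String.ofList (PySem.List.sorted (PySem.Set.ofList w.toList) (fun c => c) false)) 0).modify
        (String.ofList (PySem.List.sorted (PySem.Set.ofList w.toList) (fun c => c) false)) 0 (· + 1))
      PySem.Dict.empty
      = PySem.Dict.counter (t.map pvKey) := by
    rw [PySem.Dict.counter_eq_foldl, List.foldl_map]
    congr 1
    funext d w
    exact pvStepA_eq d (pvKey w)
  rw [hsets]
  rw [PySem.Dict.keys_counter, ← PySem.List.dedup_eq_ofList]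
  have := pvFoldl_addif (PySem.List.dedup (t.map pvKey))
    (fun k => (PySem.Dict.counter (t.map pvKey)).getD k 0 > 1)
    (fun k => PySem.Int.floordiv ((PySem.Dict.counter (t.map pvKey)).getD k 0 *
      ((PySem.Dict.counter (t.map pvKey)).getD k 0 - 1)) 2) 0
  rw [this]
  simp only [PySem.Dict.getD_counter, zero_add, pvS, pvG]

-- B's loop step, named for the invariant proof (definitionally the lambda in count_alt)
def pvStep (st : Int × PySem.Dict String Int) (w : String) : Int × PySem.Dict String Int :=
  let k := String.ofList (PySem.List.sorted (PySem.Set.ofList w.toList) (fun c => c) false)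
  let prev := st.2.getD k 0
  (st.1 + prev, st.2.insert k (prev + 1))

theorem pvStep_eq (p : Int × PySem.Dict String Int) (w : String) :
    pvStep p w = (p.1 + p.2.getD (pvKey w) 0,
      p.2.insert (pvKey w) (p.2.getD (pvKey w) 0 + 1)) := rfl

-- invariant of B's single pass: the running total is pvS of the keys seen so far,
-- and the dict holds each key's multiplicity so far
theorem alt_inv (t : List String) :
    (t.foldl pvStep (0, PySem.Dict.empty)).1 = pvS (t.map pvKey)
    ∧ ∀ k, (t.foldl pvStep (0, PySem.Dict.empty)).2.getD k 0
        = ((t.map pvKey).count k : Int) := by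
  induction t using List.reverseRecOn with
  | nil => simp [pvS, PySem.List.dedup]
  | append_singleton ws w ih =>
    obtain ⟨ih1, ih2⟩ := ih
    rw [List.foldl_append, List.foldl_cons, List.foldl_nil, pvStep_eq]
    refine ⟨?_, ?_⟩
    · rw [List.map_append, List.map_cons, List.map_nil, pvS_concat]
      dsimp only
      rw [ih1, ih2]
    · intro k
      dsimp only
      by_cases hk : k = pvKey w
      · subst hk
        rw [PySem.Dict.getD_insert_self, ih2]
        simp [List.count_append]
      · rw [PySem.Dict.getD_insert_of_ne _ _ _ hk, ih2]
        simp [List.count_append, Ne.symm hk]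

theorem count_alt_eq_pvS (t : List String) : count_alt t = pvS (t.map pvKey) := by
  have h : count_alt t = (t.foldl pvStep (0, PySem.Dict.empty)).1 := rfl
  rw [h, (alt_inv t).1]

-- ===== VERDICT (by name: the statement is the Claim_ definition above) =====
theorem count_spec : Claim_equal_count := by
  intro t _
  unfold Spec_count
  rw [count_eq_pvS, count_alt_eq_pvS]
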